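-- pv_equiv track=rewrite | github.com/simplyajith/four-in-a-row | src/verify_winner.py | __verify_all_consecutive_rows_are_same
-- ===== SOURCE A (Python) =====
-- def __verify_all_consecutive_rows_are_same(board, column, player_symbol):
-- 	"""
--
-- 	:param board: game board, player is playing
-- 	:param column: current column played by the player
-- 	:param player_symbol: symbol of the current player
-- 	:return: True if 4 consecutive row in the column played by the user are same
-- 			False, otherwise
-- 	"""
--
-- 	row = 0
-- 	while row < len(board) - 3:
--
-- 		if board[row][column] == player_symbol and board[row + 1][column] == player_symbol and board[row + 2][
-- 			column] == player_symbol and board[row + 3][column] == player_symbol: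
-- 			return True
-- 		row += 1
-- 	return False
-- ===== SOURCE B (Python) =====
-- def __verify_all_consecutive_rows_are_same(board, column, player_symbol):
--     if len(board) < 4:
--         return False
--     streak = 0
--     for row in board:
--         if row[column] == player_symbol:
--             streak += 1
--             if streak == 4:
--                 return True
--         else:
--             streak = 0
--     return False
-- ===== Notes on version B (the rewrite author's own statement) =====
-- stated objective: simpler
-- what changed: Replaces the 4-cell window conjunction scanned at every start row by a single pass over the column that maintains a running streak counter, returning True when the streak reaches 4.
-- outside the precondition, e.g. on __verify_all_consecutive_rows_are_same([['x'], ['x'], ['x'], []], 0, 'o'): A returns False, B raises IndexError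
import Mathlib
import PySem

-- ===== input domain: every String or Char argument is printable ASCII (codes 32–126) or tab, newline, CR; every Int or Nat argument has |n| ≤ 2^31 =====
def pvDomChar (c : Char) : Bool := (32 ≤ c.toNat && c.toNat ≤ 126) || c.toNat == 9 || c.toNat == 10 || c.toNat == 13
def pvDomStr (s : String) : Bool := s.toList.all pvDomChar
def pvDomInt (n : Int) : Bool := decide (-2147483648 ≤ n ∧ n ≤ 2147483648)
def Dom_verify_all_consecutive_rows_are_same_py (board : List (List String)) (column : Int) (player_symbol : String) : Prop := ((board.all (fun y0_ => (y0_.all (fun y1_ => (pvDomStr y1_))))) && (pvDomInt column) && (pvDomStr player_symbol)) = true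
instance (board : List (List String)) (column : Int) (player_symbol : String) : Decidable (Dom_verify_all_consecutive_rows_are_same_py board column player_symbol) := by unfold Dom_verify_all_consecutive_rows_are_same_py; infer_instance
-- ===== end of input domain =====

-- B replaces A's 4-cell window conjunction with a single streak-counter pass over the column (simpler decomposition, same O(n) cost).


-- ===== PORT A =====
-- board[i][column] as A reads it; Pre_ guarantees the lookups succeed, so getD defaults are never taken inside Pre_.
def pvCellA (board : List (List String)) (column : Int) (i : Nat) : String :=
  (PySem.List.pyGet? ((PySem.List.pyGet? board (i : Int)).getD []) column).getD ""

-- A's while loop: window of 4 rows checked at each start row.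
def pvALoop (board : List (List String)) (column : Int) (player_symbol : String) (row : Nat) : Bool :=
  if row + 3 < board.length then
    if pvCellA board column row == player_symbol && pvCellA board column (row + 1) == player_symbol
        && pvCellA board column (row + 2) == player_symbol && pvCellA board column (row + 3) == player_symbol then
      true
    else
      pvALoop board column player_symbol (row + 1)
  else
    false
termination_by board.length - row

def verify_all_consecutive_rows_are_same_py (board : List (List String)) (column : Int) (player_symbol : String) : Bool :=
  pvALoop board column player_symbol 0

-- ===== PORT B =====
-- B's for loop: streak counter over the rows.
def pvBLoop (rows : List (List String)) (column : Int) (player_symbol : String) (streak : Nat) : Bool :=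
  match rows with
  | [] => false
  | r :: rest =>
    if (PySem.List.pyGet? r column).getD "" == player_symbol then
      if streak + 1 == 4 then true else pvBLoop rest column player_symbol (streak + 1)
    else
      pvBLoop rest column player_symbol 0

def verify_all_consecutive_rows_are_same_py_alt (board : List (List String)) (column : Int) (player_symbol : String) : Bool :=
  if board.length < 4 then false else pvBLoop board column player_symbol 0

-- ===== PRECONDITION & SPEC =====
-- Pre_ excludes ragged boards of 4 or more rows in which some row lacks a valid entry at `column`:
-- A can still return False there because its short-circuiting window may never read the bad row,
-- but B's uniform one-read-per-row scan raises IndexError.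
def Pre_verify_all_consecutive_rows_are_same_py (board : List (List String)) (column : Int) (player_symbol : String) : Prop :=
  board.length < 4 ∨ ∀ r ∈ board, PySem.Raise.InRange r.length column
instance (board : List (List String)) (column : Int) (player_symbol : String) : Decidable (Pre_verify_all_consecutive_rows_are_same_py board column player_symbol) := by unfold Pre_verify_all_consecutive_rows_are_same_py; infer_instance

def pvWitness_verify_all_consecutive_rows_are_same_py : List (List String) × Int × String :=
  ([["x"], ["x"], ["x"], ["x"]], 0, "x")

def Spec_verify_all_consecutive_rows_are_same_py (board : List (List String)) (column : Int) (player_symbol : String) (out : Bool) : Prop := out = verify_all_consecutive_rows_are_same_py_alt board column player_symbol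
instance (board : List (List String)) (column : Int) (player_symbol : String) (out : Bool) : Decidable (Spec_verify_all_consecutive_rows_are_same_py board column player_symbol out) := by unfold Spec_verify_all_consecutive_rows_are_same_py; infer_instance

-- ===== CLAIM (what is proved, stated in full; the proofs are below) =====
def Claim_equal_verify_all_consecutive_rows_are_same_py : Prop := ∀ (board : List (List String)) (column : Int) (player_symbol : String), Dom_verify_all_consecutive_rows_are_same_py board column player_symbol → Pre_verify_all_consecutive_rows_are_same_py board column player_symbol → Spec_verify_all_consecutive_rows_are_same_py board column player_symbol (verify_all_consecutive_rows_are_same_py board column player_symbol)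

-- ===== LEMMAS AND PROOFS =====

-- The column projected to match/mismatch booleans.
def pvCells (board : List (List String)) (column : Int) (player_symbol : String) : List Bool :=
  board.map (fun r => (PySem.List.pyGet? r column).getD "" == player_symbol)

-- Window check on the boolean column.
def pvW : List Bool → Bool
  | a :: b :: c :: d :: rest => (a && b && c && d) || pvW (b :: c :: d :: rest)
  | _ => false

-- Streak check on the boolean column.
def pvS : List Bool → Nat → Bool
  | [], _ => false
  | b :: rest, k => if b then (if k + 1 == 4 then true else pvS rest (k + 1)) else pvS rest 0

-- "the first m entries are all true" (false if fewer than m entries).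
def pvPref : Nat → List Bool → Bool
  | 0, _ => true
  | _ + 1, [] => false
  | m + 1, b :: rest => b && pvPref m rest

theorem pvW_short : ∀ l : List Bool, l.length < 4 → pvW l = false := by
  intro l h
  match l with
  | [] => rfl
  | [_] => rfl
  | [_, _] => rfl
  | [_, _, _] => rfl
  | _ :: _ :: _ :: _ :: _ => simp at h; omega

theorem pvW_cons (b : Bool) (rest : List Bool) : pvW (b :: rest) = (pvPref 4 (b :: rest) || pvW rest) := by
  match rest with
  | [] => simp [pvW, pvPref]
  | [_] => simp [pvW, pvPref]
  | [_, _] => simp [pvW, pvPref]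
  | x :: y :: z :: t => simp [pvW, pvPref, Bool.and_assoc]

theorem pvPref_mono (l : List Bool) : ∀ m m' : Nat, m' ≤ m → pvPref m l = true → pvPref m' l = true := by
  induction l with
  | nil =>
    intro m m' hle h
    cases m' with
    | zero => rfl
    | succ n => cases m with
      | zero => omega
      | succ k => simp [pvPref] at h
  | cons b rest ih =>
    intro m m' hle h
    cases m' with
    | zero => rfl
    | succ n =>
      cases m with
      | zero => omega
      | succ k =>
        simp [pvPref] at h ⊢
        exact ⟨h.1, ih k n (by omega) h.2⟩

theorem pvPref4_W (l : List Bool) (h : pvPref 4 l = true) : pvW l = true := by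
  cases l with
  | nil => simp [pvPref] at h
  | cons b rest => rw [pvW_cons]; simp [h]

theorem pvS_eq_pref_or_W (l : List Bool) : ∀ k m : Nat, k + m = 4 → 1 ≤ m → pvS l k = (pvPref m l || pvW l) := by
  induction l with
  | nil =>
    intro k m hm h1
    cases m with
    | zero => omega
    | succ n => simp [pvS, pvPref, pvW]
  | cons b rest ih =>
    intro k m hm h1
    by_cases hb : b = true
    · subst hb
      cases m with
      | zero => omega
      | succ n =>
        cases n with
        | zero =>
          -- k = 3: streak reaches 4
          have hk : k = 3 := by omega
          subst hk
          simp [pvS, pvPref]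
        | succ n' =>
          have hk4 : ¬ (k + 1 = 4) := by omega
          have hk4' : (k + 1 == 4) = false := by simpa using hk4
          have step : pvS (true :: rest) k = pvS rest (k + 1) := by
            simp [pvS, hk4']
          rw [step, ih (k + 1) (n' + 1) (by omega) (by omega)]
          rw [pvW_cons]
          have hpref4 : pvPref 4 (true :: rest) = pvPref 3 rest := by simp [pvPref]
          rw [hpref4]
          simp only [pvPref, Bool.true_and]
          by_cases h3 : pvPref 3 rest = true
          · have := pvPref_mono rest 3 (n' + 1) (by omega) h3
            simp [h3, this]
          · simp [Bool.not_eq_true] at h3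
            simp [h3]
    · simp [Bool.not_eq_true] at hb
      subst hb
      have step : pvS (false :: rest) k = pvS rest 0 := by simp [pvS]
      rw [step, ih 0 4 (by omega) (by omega)]
      cases m with
      | zero => omega
      | succ n =>
        have hpm : pvPref (n + 1) (false :: rest) = false := by simp [pvPref]
        rw [pvW_cons, hpm]
        have hpref4 : pvPref 4 (false :: rest) = false := by simp [pvPref]
        rw [hpref4]
        by_cases h4 : pvPref 4 rest = true
        · simp [h4, pvPref4_W rest h4]
        · simp [Bool.not_eq_true] at h4
          simp [h4]

theorem pvS_eq_W (l : List Bool) : pvS l 0 = pvW l := by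
  rw [pvS_eq_pref_or_W l 0 4 rfl (by omega)]
  by_cases h4 : pvPref 4 l = true
  · simp [h4, pvPref4_W l h4]
  · simp [Bool.not_eq_true] at h4
    simp [h4]

theorem pvBLoop_eq_pvS (column : Int) (player_symbol : String) :
    ∀ (rows : List (List String)) (k : Nat), pvBLoop rows column player_symbol k = pvS (pvCells rows column player_symbol) k := by
  intro rows
  induction rows with
  | nil => intro k; rfl
  | cons r rest ih =>
    intro k
    have hc : pvCells (r :: rest) column player_symbol
        = ((PySem.List.pyGet? r column).getD "" == player_symbol) :: pvCells rest column player_symbol := rfl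
    rw [hc]
    by_cases h : ((PySem.List.pyGet? r column).getD "" == player_symbol) = true
    · simp [pvBLoop, pvS, h, ih]
    · simp only [Bool.not_eq_true] at h
      simp [pvBLoop, pvS, h, ih]

theorem pvCell_eq (board : List (List String)) (column : Int) (player_symbol : String) (i : Nat) (h : i < board.length) :
    (pvCellA board column i == player_symbol) = (pvCells board column player_symbol)[i]'(by simpa [pvCells]) := by
  simp [pvCellA, pvCells, PySem.List.pyGet?_natCast, List.getElem?_eq_getElem h]

theorem pvALoop_eq_pvW (board : List (List String)) (column : Int) (player_symbol : String) :
    ∀ (n row : Nat), board.length - row ≤ n →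
      pvALoop board column player_symbol row = pvW ((pvCells board column player_symbol).drop row) := by
  intro n
  induction n with
  | zero =>
    intro row hr
    rw [pvALoop]
    have h4 : ¬ (row + 3 < board.length) := by omega
    simp only [h4, if_false]
    rw [pvW_short]
    simp [pvCells]
    omega
  | succ n ih =>
    intro row hr
    rw [pvALoop]
    by_cases h4 : row + 3 < board.length
    · simp only [h4, if_true]
      set l := pvCells board column player_symbol with hl
      have hlen : l.length = board.length := by simp [hl, pvCells]
      have d0 : l.drop row = l[row]'(by omega) :: l.drop (row + 1) :=
        List.drop_eq_getElem_cons (by omega)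
      have d1 : l.drop (row + 1) = l[row + 1]'(by omega) :: l.drop (row + 2) :=
        List.drop_eq_getElem_cons (by omega)
      have d2 : l.drop (row + 2) = l[row + 2]'(by omega) :: l.drop (row + 3) :=
        List.drop_eq_getElem_cons (by omega)
      have d3 : l.drop (row + 3) = l[row + 3]'(by omega) :: l.drop (row + 4) :=
        List.drop_eq_getElem_cons (by omega)
      rw [d0, d1, d2, d3]
      simp only [pvW]
      rw [← d3, ← d2, ← d1]
      rw [← ih (row + 1) (by omega)]
      rw [pvCell_eq board column player_symbol row (by omega),
          pvCell_eq board column player_symbol (row + 1) (by omega),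
          pvCell_eq board column player_symbol (row + 2) (by omega),
          pvCell_eq board column player_symbol (row + 3) (by omega)]
      by_cases hc : (l[row]'(by omega) && l[row + 1]'(by omega) && l[row + 2]'(by omega) && l[row + 3]'(by omega)) = true
      · simp only [hl] at hc ⊢
        simp [Bool.and_assoc]
      · simp only [Bool.not_eq_true] at hc
        simp only [hl] at hc ⊢
        simp only [Bool.and_assoc] at hc
        simp [Bool.and_assoc]
    · simp only [h4, if_false]
      rw [pvW_short]
      simp [pvCells]
      omega

-- ===== VERDICT (by name: the statement is the Claim_ definition above) =====
theorem verify_all_consecutive_rows_are_same_py_spec : Claim_equal_verify_all_consecutive_rows_are_same_py := by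
  intro board column player_symbol _hdom _hpre
  unfold Spec_verify_all_consecutive_rows_are_same_py
  unfold verify_all_consecutive_rows_are_same_py verify_all_consecutive_rows_are_same_py_alt
  rw [pvALoop_eq_pvW board column player_symbol board.length 0 (by omega)]
  by_cases hlen : board.length < 4
  · simp only [hlen, if_true]
    rw [List.drop_zero, pvW_short]
    simp [pvCells]
    omega
  · simp only [hlen, if_false]
    rw [pvBLoop_eq_pvS, pvS_eq_W, List.drop_zero]
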